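-- pv_equiv track=rewrite | github.com/hzi09/Coding_Test | 프로그래머스/2/148653. 마법의 엘리베이터/마법의 엘리베이터.py | solution
-- ===== SOURCE A (Python) =====
-- def solution(storey):
--     answer = 0
--
--     while storey > 0:
--         last_digit = storey % 10
--         next_digit = (storey // 10) % 10
--
--         if last_digit > 5 :
--             answer += (10 - last_digit)
--             storey += 10
--
--         elif last_digit < 5 :
--             answer += last_digit
--
--         else :
--             if next_digit >= 5 :
--                 storey += 10
--             answer += last_digit
--
--         storey //= 10
--
--     return answer
-- ===== SOURCE B (Python) =====
-- def solution(storey):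
--     def g(n, carry):
--         if n <= 0:
--             return carry
--         d = n % 10 + carry
--         return min(d + g(n // 10, 0), (10 - d) + g(n // 10, 1))
--     return g(storey, 0)
-- ===== Notes on version B (the rewrite author's own statement) =====
-- stated objective: alternative
-- what changed: Replaces the iterative greedy accumulator and its manual next-digit lookahead in the tie case by a digit recursion with a carry flag that takes the minimum of the two genuine choices (pay the digit going down, or its complement plus a carry going up).
import Mathlib
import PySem

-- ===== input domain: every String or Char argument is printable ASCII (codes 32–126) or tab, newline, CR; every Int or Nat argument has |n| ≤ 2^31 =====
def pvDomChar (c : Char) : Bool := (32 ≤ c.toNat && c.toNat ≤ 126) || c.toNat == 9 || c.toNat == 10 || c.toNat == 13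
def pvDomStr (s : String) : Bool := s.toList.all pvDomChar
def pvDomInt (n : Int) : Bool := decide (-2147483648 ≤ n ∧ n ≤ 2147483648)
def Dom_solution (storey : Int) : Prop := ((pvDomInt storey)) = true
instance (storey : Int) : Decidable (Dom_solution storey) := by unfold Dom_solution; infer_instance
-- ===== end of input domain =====

-- B replaces A's iterative greedy accumulator (with its manual next-digit lookahead in the tie case)
-- by a digit recursion with a carry flag taking the min over the two genuine moves; same cost.

-- ===== PORT A =====
-- A's while loop as tail recursion over (storey, answer); the Nat fuel only makes the
-- recursion total (storey.toNat + 1 iterations always suffice, since storey strictly decreases)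
def solutionLoop : Nat → Int → Int → Int
  | 0, _, answer => answer
  | fuel + 1, storey, answer =>
    if storey > 0 then
      let last_digit := PySem.Int.mod storey 10
      let next_digit := PySem.Int.mod (PySem.Int.floordiv storey 10) 10
      if last_digit > 5 then
        solutionLoop fuel (PySem.Int.floordiv (storey + 10) 10) (answer + (10 - last_digit))
      else if last_digit < 5 then
        solutionLoop fuel (PySem.Int.floordiv storey 10) (answer + last_digit)
      else if next_digit ≥ 5 then
        solutionLoop fuel (PySem.Int.floordiv (storey + 10) 10) (answer + last_digit)
      else
        solutionLoop fuel (PySem.Int.floordiv storey 10) (answer + last_digit)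
    else answer

def solution (storey : Int) : Int := solutionLoop (storey.toNat + 1) storey 0

-- ===== PORT B =====
-- inner helper g(n, carry) of Source B; the Nat fuel only makes the recursion total
-- (n.toNat + 1 nested calls always suffice, since n // 10 strictly decreases)
def gAlt : Nat → Int → Int → Int
  | 0, _, carry => carry
  | fuel + 1, n, carry =>
    if n ≤ 0 then carry
    else
      let d := PySem.Int.mod n 10 + carry
      min (d + gAlt fuel (PySem.Int.floordiv n 10) 0)
          ((10 - d) + gAlt fuel (PySem.Int.floordiv n 10) 1)

def solution_alt (storey : Int) : Int := gAlt (storey.toNat + 1) storey 0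

-- ===== PRECONDITION & SPEC =====
def Spec_solution (storey : Int) (out : Int) : Prop := out = solution_alt storey
instance (storey : Int) (out : Int) : Decidable (Spec_solution storey out) := by unfold Spec_solution; infer_instance

-- ===== CLAIM (what is proved, stated in full; the proofs are below) =====
def Claim_equal_solution : Prop := ∀ (storey : Int), Dom_solution storey → Spec_solution storey (solution storey)

-- ===== LEMMAS AND PROOFS =====

lemma pv_fd (a : Int) : PySem.Int.floordiv a 10 = a / 10 :=
  PySem.Int.floordiv_eq_ediv_of_pos (by norm_num)

lemma pv_md (a : Int) : PySem.Int.mod a 10 = a % 10 :=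
  PySem.Int.mod_eq_emod_of_pos (by norm_num)

-- the fuel is irrelevant as long as it exceeds the measure
lemma gAlt_fuel : ∀ (f₁ : Nat) (f₂ : Nat) (n c : Int), n.toNat < f₁ → n.toNat < f₂ →
    gAlt f₁ n c = gAlt f₂ n c := by
  intro f₁
  induction f₁ with
  | zero => intro f₂ n c h1 _; omega
  | succ k ih =>
    intro f₂ n c h1 h2
    match f₂, h2 with
    | m + 1, _ =>
      simp only [gAlt]
      by_cases hn : n ≤ 0
      · simp [hn]
      · have hq : (PySem.Int.floordiv n 10).toNat < k := by
          have := pv_fd n; omega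
        have hq2 : (PySem.Int.floordiv n 10).toNat < m := by
          have := pv_fd n; omega
        rw [if_neg hn, if_neg hn, ih m _ 0 hq hq2, ih m _ 1 hq hq2]

-- g with always-sufficient fuel (proof-side view of gAlt)
def gA (n c : Int) : Int := gAlt (n.toNat + 1) n c

lemma gA_nonpos (n c : Int) (h : n ≤ 0) : gA n c = c := by
  unfold gA
  simp only [gAlt, if_pos h]

lemma gAlt_step (f : Nat) (n c : Int) :
    gAlt (f + 1) n c =
      if n ≤ 0 then c
      else min (PySem.Int.mod n 10 + c + gAlt f (PySem.Int.floordiv n 10) 0)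
               (10 - (PySem.Int.mod n 10 + c) + gAlt f (PySem.Int.floordiv n 10) 1) := rfl

lemma gA_pos (n c : Int) (h : 0 < n) :
    gA n c = min (n % 10 + c + gA (n / 10) 0) (10 - (n % 10 + c) + gA (n / 10) 1) := by
  unfold gA
  have hfd := pv_fd n
  have hmd := pv_md n
  rw [gAlt_step, if_neg (by omega : ¬ n ≤ 0), hfd, hmd,
      gAlt_fuel n.toNat ((n / 10).toNat + 1) (n / 10) 0 (by omega) (by omega),
      gAlt_fuel n.toNat ((n / 10).toNat + 1) (n / 10) 1 (by omega) (by omega)]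

-- going down first is at most one worse than carrying first, and conversely
lemma gA_01 (n : Int) : gA n 0 ≤ gA n 1 + 1 := by
  by_cases h : n ≤ 0
  · simp [gA_nonpos _ _ h]
  · rw [gA_pos n 0 (by omega), gA_pos n 1 (by omega)]
    simp only [min_def]; split_ifs <;> omega

lemma gA_10 (n : Int) : gA n 1 ≤ gA n 0 + 1 := by
  by_cases h : n ≤ 0
  · simp [gA_nonpos _ _ h]
  · rw [gA_pos n 0 (by omega), gA_pos n 1 (by omega)]
    simp only [min_def]; split_ifs <;> omega

-- if the last digit is ≥ 5, the carrying variant is no worse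
lemma gA_carry_le (n : Int) (h : 0 < n) (h5 : 5 ≤ n % 10) : gA n 1 ≤ gA n 0 := by
  have hb := gA_10 (n / 10)
  have hd9 : n % 10 ≤ 9 := by omega
  rw [gA_pos n 0 h, gA_pos n 1 h]
  simp only [min_def]; split_ifs <;> omega

-- if the last digit is < 5, not carrying is no worse
lemma gA_le_carry (n : Int) (_h : 0 ≤ n) (h5 : n % 10 < 5) : gA n 0 ≤ gA n 1 := by
  by_cases h0 : n ≤ 0
  · simp [gA_nonpos _ _ h0]
  · have ha := gA_01 (n / 10)
    rw [gA_pos n 0 (by omega), gA_pos n 1 (by omega)]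
    simp only [min_def]; split_ifs <;> omega

-- the carry flag means "+1": g(n,1) = g(n+1,0)
lemma gA_shift : ∀ (k : Nat) (n : Int), n.toNat ≤ k → 0 ≤ n → gA n 1 = gA (n + 1) 0 := by
  intro k
  induction k with
  | zero =>
    intro n hk hn
    have h0 : n = 0 := by omega
    subst h0
    rw [gA_nonpos 0 1 (by omega), zero_add, gA_pos 1 0 (by omega)]
    norm_num [gA_nonpos 0 0 (by omega : (0:Int) ≤ 0), gA_nonpos 0 1 (by omega : (0:Int) ≤ 0)]
  | succ k ih =>
    intro n hk hn
    by_cases h0 : n = 0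
    · subst h0
      rw [gA_nonpos 0 1 (by omega), zero_add, gA_pos 1 0 (by omega)]
      norm_num [gA_nonpos 0 0 (by omega : (0:Int) ≤ 0), gA_nonpos 0 1 (by omega : (0:Int) ≤ 0)]
    · have hpos : 0 < n := by omega
      rw [gA_pos n 1 hpos, gA_pos (n + 1) 0 (by omega)]
      by_cases h9 : n % 10 < 9
      · have e1 : (n + 1) % 10 = n % 10 + 1 := by omega
        have e2 : (n + 1) / 10 = n / 10 := by omega
        rw [e1, e2]
        congr 1 <;> omega
      · -- last digit 9: the carry ripples
        have e1 : (n + 1) % 10 = 0 := by omega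
        have e2 : (n + 1) / 10 = n / 10 + 1 := by omega
        have hq : 0 ≤ n / 10 := by omega
        have hih : gA (n / 10) 1 = gA (n / 10 + 1) 0 := ih (n / 10) (by omega) hq
        have hb := gA_10 (n / 10)
        have ha := gA_01 (n / 10 + 1)
        rw [e1, e2, ← hih]
        simp only [min_def]; split_ifs <;> omega

-- the loop with always-sufficient fuel (proof-side view of solutionLoop)
def loopA (n acc : Int) : Int := solutionLoop (n.toNat + 1) n acc

lemma loop_fuel : ∀ (f₁ : Nat) (f₂ : Nat) (n acc : Int), n.toNat < f₁ → n.toNat < f₂ →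
    solutionLoop f₁ n acc = solutionLoop f₂ n acc := by
  intro f₁
  induction f₁ with
  | zero => intro f₂ n acc h1 _; omega
  | succ k ih =>
    intro f₂ n acc h1 h2
    match f₂, h2 with
    | m + 1, _ =>
      simp only [solutionLoop]
      by_cases hn : n > 0
      · have hfd := pv_fd n
        have hfd2 := pv_fd (n + 10)
        have hmd := pv_md n
        have hmd2 := pv_md (PySem.Int.floordiv n 10)
        rw [if_pos hn, if_pos hn]
        split_ifs with hA hB hC
        · exact ih m _ _ (by omega) (by omega)
        · exact ih m _ _ (by omega) (by omega)
        · exact ih m _ _ (by omega) (by omega)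
        · exact ih m _ _ (by omega) (by omega)
      · rw [if_neg hn, if_neg hn]

lemma loop_nonpos (n acc : Int) (h : ¬ n > 0) : loopA n acc = acc := by
  unfold loopA
  simp only [solutionLoop, if_neg h]

lemma loop_step (f : Nat) (n acc : Int) :
    solutionLoop (f + 1) n acc =
      if n > 0 then
        if PySem.Int.mod n 10 > 5 then
          solutionLoop f (PySem.Int.floordiv (n + 10) 10) (acc + (10 - PySem.Int.mod n 10))
        else if PySem.Int.mod n 10 < 5 then
          solutionLoop f (PySem.Int.floordiv n 10) (acc + PySem.Int.mod n 10)
        else if PySem.Int.mod (PySem.Int.floordiv n 10) 10 ≥ 5 then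
          solutionLoop f (PySem.Int.floordiv (n + 10) 10) (acc + PySem.Int.mod n 10)
        else solutionLoop f (PySem.Int.floordiv n 10) (acc + PySem.Int.mod n 10)
      else acc := rfl

lemma loop_unfold (n acc : Int) (h : 0 < n) :
    loopA n acc =
      if n % 10 > 5 then loopA ((n + 10) / 10) (acc + (10 - n % 10))
      else if n % 10 < 5 then loopA (n / 10) (acc + n % 10)
      else if (n / 10) % 10 ≥ 5 then loopA ((n + 10) / 10) (acc + n % 10)
      else loopA (n / 10) (acc + n % 10) := by
  unfold loopA
  have hfd := pv_fd n
  have hfd2 := pv_fd (n + 10)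
  have hmd := pv_md n
  have hmd2 := pv_md (n / 10)
  rw [loop_step, if_pos h, hfd, hfd2, hmd, hmd2]
  split_ifs with hA hB hC
  · exact loop_fuel n.toNat (((n + 10) / 10).toNat + 1) _ _ (by omega) (by omega)
  · exact loop_fuel n.toNat ((n / 10).toNat + 1) _ _ (by omega) (by omega)
  · exact loop_fuel n.toNat (((n + 10) / 10).toNat + 1) _ _ (by omega) (by omega)
  · exact loop_fuel n.toNat ((n / 10).toNat + 1) _ _ (by omega) (by omega)

lemma loop_eq_gA : ∀ (k : Nat) (n acc : Int), n.toNat ≤ k →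
    loopA n acc = acc + gA n 0 := by
  intro k
  induction k with
  | zero =>
    intro n acc hk
    rw [loop_nonpos n acc (by omega), gA_nonpos n 0 (by omega)]
    ring
  | succ k ih =>
    intro n acc hk
    by_cases hn : n ≤ 0
    · rw [loop_nonpos n acc (by omega), gA_nonpos n 0 hn]; ring
    · have hpos : 0 < n := by omega
      have hq : 0 ≤ n / 10 := by omega
      have hq10 : (n + 10) / 10 = n / 10 + 1 := by omega
      rw [loop_unfold n acc hpos, gA_pos n 0 hpos]
      have hshift : gA (n / 10) 1 = gA (n / 10 + 1) 0 :=
        gA_shift k (n / 10) (by omega) hq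
      split_ifs with h1 h2 h3
      · -- last digit > 5: greedy carries up
        rw [hq10, ih (n / 10 + 1) _ (by omega), ← hshift]
        have hb := gA_10 (n / 10)
        simp only [min_def]; split_ifs <;> omega
      · -- last digit < 5: greedy goes down
        rw [ih (n / 10) _ (by omega)]
        have ha := gA_01 (n / 10)
        simp only [min_def]; split_ifs <;> omega
      · -- tie with next digit ≥ 5: greedy carries up
        rw [hq10, ih (n / 10 + 1) _ (by omega), ← hshift]
        have hc := gA_carry_le (n / 10) (by omega) h3
        simp only [min_def]; split_ifs <;> omega
      · -- tie with next digit < 5: greedy goes down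
        rw [ih (n / 10) _ (by omega)]
        have hd := gA_le_carry (n / 10) hq (by omega)
        simp only [min_def]; split_ifs <;> omega

-- ===== VERDICT (by name: the statement is the Claim_ definition above) =====
theorem solution_spec : Claim_equal_solution := by
  intro storey _
  unfold Spec_solution solution solution_alt
  have h := loop_eq_gA storey.toNat storey 0 (le_refl _)
  unfold loopA gA at h
  omega
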